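-- pv_equiv track=rewrite | github.com/jakobvalic/C-Sharp | 1-ponovitev/ponovitev_python.py | lego_kocke
-- ===== SOURCE A (Python) =====
-- def lego_kocke(sez_kock):
--     '''Iz seznama lego kock naredi slovar {oblika : barva}.'''
--     slovar_kock = dict()
--     for kocka in sez_kock:
--         (oblika, barva) = kocka.split('.')
--         slovar_kocke = slovar_kock.get(oblika, dict())
--         slovar_kocke[barva] = slovar_kocke.get(barva, 0) + 1
--         slovar_kock[oblika] = slovar_kocke
--     return slovar_kock
-- ===== SOURCE B (Python) =====
-- def lego_kocke(sez_kock):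
--     '''Iz seznama lego kock naredi slovar {oblika : barva}.'''
--     # pass 1: group colors per shape, preserving first-seen order
--     skupine = {}
--     for kocka in sez_kock:
--         (oblika, barva) = kocka.split('.')
--         skupine.setdefault(oblika, []).append(barva)
--     # pass 2: count each group's colors (first-seen color order)
--     return {oblika: {b: barve.count(b) for b in dict.fromkeys(barve)}
--             for oblika, barve in skupine.items()}
-- ===== Notes on version B (the rewrite author's own statement) =====
-- stated objective: alternative
-- what changed: B replaces A's incremental nested-dict counting with two differently-shaped passes: first group colors per shape into lists, then build the result by counting each grouped list (ordered dedup + count), preserving insertion order.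
import Mathlib
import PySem

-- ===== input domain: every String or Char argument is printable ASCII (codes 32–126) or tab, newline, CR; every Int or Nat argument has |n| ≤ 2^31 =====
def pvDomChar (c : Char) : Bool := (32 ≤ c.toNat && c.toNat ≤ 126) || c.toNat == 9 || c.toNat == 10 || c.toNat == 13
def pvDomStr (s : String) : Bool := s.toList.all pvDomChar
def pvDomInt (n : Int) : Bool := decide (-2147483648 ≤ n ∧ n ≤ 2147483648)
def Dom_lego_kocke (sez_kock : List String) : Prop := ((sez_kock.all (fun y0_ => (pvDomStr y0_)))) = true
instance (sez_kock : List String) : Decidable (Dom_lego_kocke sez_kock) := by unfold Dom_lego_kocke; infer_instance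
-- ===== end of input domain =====

-- B groups colors per shape in one pass, then counts each group in a second pass (alternative decomposition; same values and insertion order as A).


-- ===== PORT A =====
-- A's loop body: bump the count of barva inside the nested dict at oblika
def legoStepA (slovar_kock : PySem.Dict String (PySem.Dict String Int)) (kocka : String) :
    PySem.Dict String (PySem.Dict String Int) :=
  match PySem.Str.split? kocka "." with
  | some [oblika, barva] =>
      let slovar_kocke := slovar_kock.getD oblika PySem.Dict.empty
      let slovar_kocke := slovar_kocke.insert barva (slovar_kocke.getD barva 0 + 1)
      slovar_kock.insert oblika slovar_kocke
  | _ => slovar_kock  -- Python raises ValueError here (unpacking); excluded by Pre_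

def lego_kocke (sez_kock : List String) : List (String × List (String × Int)) :=
  (sez_kock.foldl legoStepA PySem.Dict.empty).items.map (fun p => (p.1, p.2.items))

-- ===== PORT B =====
-- B's pass-1 loop body: skupine.setdefault(oblika, []).append(barva)
def legoStepB (skupine : PySem.Dict String (List String)) (kocka : String) :
    PySem.Dict String (List String) :=
  match PySem.Str.split? kocka "." with
  | some [oblika, barva] => skupine.modify oblika [] (· ++ [barva])
  | _ => skupine  -- Python raises ValueError here (unpacking); excluded by Pre_

def lego_kocke_alt (sez_kock : List String) : List (String × List (String × Int)) :=
  let skupine := sez_kock.foldl legoStepB PySem.Dict.empty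
  skupine.items.map (fun p =>
    (p.1, (PySem.List.dedup p.2).map (fun b => (b, (p.2.count b : Int)))))

-- ===== PRECONDITION & SPEC =====
-- Pre_ excludes exactly the inputs where the unpacking '(oblika, barva) = kocka.split(".")' raises ValueError in both A and B
def Pre_lego_kocke (sez_kock : List String) : Prop :=
  (sez_kock.all (fun s => ((PySem.Str.split? s ".").getD []).length == 2)) = true
instance (sez_kock : List String) : Decidable (Pre_lego_kocke sez_kock) := by unfold Pre_lego_kocke; infer_instance
def pvWitness_lego_kocke : List String := ["kvadrat.rdeca", "kvadrat.modra", "krog.rdeca", "kvadrat.rdeca"]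

def Spec_lego_kocke (sez_kock : List String) (out : List (String × List (String × Int))) : Prop := out = lego_kocke_alt sez_kock
instance (sez_kock : List String) (out : List (String × List (String × Int))) : Decidable (Spec_lego_kocke sez_kock out) := by unfold Spec_lego_kocke; infer_instance

-- ===== CLAIM (what is proved, stated in full; the proofs are below) =====
def Claim_equal_lego_kocke : Prop := ∀ (sez_kock : List String), Dom_lego_kocke sez_kock → Pre_lego_kocke sez_kock → Spec_lego_kocke sez_kock (lego_kocke sez_kock)

-- ===== LEMMAS AND PROOFS =====

-- count every group: the map relating B's grouping state to A's nested-dict state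
def pvCount (p : String × List String) : String × PySem.Dict String Int :=
  (p.1, PySem.Dict.counter p.2)

def pvDmap (g : PySem.Dict String (List String)) : PySem.Dict String (PySem.Dict String Int) :=
  PySem.Dict.mk (g.items.map pvCount)

lemma keys_pvDmap (g : PySem.Dict String (List String)) : (pvDmap g).keys = g.keys := by
  simp [pvDmap, PySem.Dict.keys, pvCount]

lemma contains_pvDmap (g : PySem.Dict String (List String)) (o : String) :
    (pvDmap g).contains o = g.contains o := by
  rw [PySem.Dict.contains_eq_decide_mem_keys, PySem.Dict.contains_eq_decide_mem_keys, keys_pvDmap]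

lemma getD_pvDmap (g : PySem.Dict String (List String)) (o : String) (hnd : g.keys.Nodup) :
    (pvDmap g).getD o PySem.Dict.empty = PySem.Dict.counter (g.getD o []) := by
  by_cases hc : g.contains o = true
  · have h1 : g.get? o = some (g.getD o []) := by
      rw [PySem.Dict.contains_eq_isSome_get?] at hc
      cases h : g.get? o with
      | none => rw [h] at hc; simp at hc
      | some v => rw [PySem.Dict.getD_of_get?_eq_some g [] h]
    have h2 : (o, PySem.Dict.counter (g.getD o [])) ∈ (pvDmap g).items := by
      have := PySem.Dict.mem_items_of_get?_eq_some g h1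
      simpa [pvDmap] using List.mem_map_of_mem this
    exact PySem.Dict.getD_of_mem_items _ h2 (by rw [show (pvDmap g).keys.Nodup ↔ g.keys.Nodup from by rw [keys_pvDmap]]; exact hnd) _
  · have hc' : g.contains o = false := by simpa using hc
    rw [PySem.Dict.getD_of_not_contains _ _ (by rw [contains_pvDmap]; exact hc'),
        PySem.Dict.getD_of_not_contains _ _ hc']
    rfl

lemma pvDmap_insert (g : PySem.Dict String (List String)) (o : String) (v : List String) :
    (pvDmap g).insert o (PySem.Dict.counter v) = pvDmap (g.insert o v) := by
  apply PySem.Dict.ext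
  rw [PySem.Dict.items_insert]
  show _ = (g.insert o v).items.map pvCount
  rw [PySem.Dict.items_insert, contains_pvDmap]
  by_cases hc : g.contains o = true
  · simp only [hc, if_true]
    show ((g.items.map pvCount).map _) = _
    rw [List.map_map, List.map_map]
    apply List.map_congr_left
    intro p _
    by_cases h : p.1 = o <;> simp [pvCount, h]
  · simp only [hc]
    show (g.items.map pvCount) ++ [(o, PySem.Dict.counter v)] = _
    simp [pvCount]

-- one A-step mirrors one B-step through pvDmap
lemma step_pvDmap (g : PySem.Dict String (List String)) (s : String) (hnd : g.keys.Nodup)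
    (hs : ((PySem.Str.split? s ".").getD []).length = 2) :
    legoStepA (pvDmap g) s = pvDmap (legoStepB g s) := by
  obtain ⟨parts, hp⟩ : ∃ parts, PySem.Str.split? s "." = some parts := by
    cases h : PySem.Str.split? s "." with
    | none => rw [h] at hs; simp at hs
    | some v => exact ⟨v, rfl⟩
  rw [hp] at hs
  match parts, hs with
  | [o, b], _ =>
    simp only [legoStepA, legoStepB, hp]
    rw [getD_pvDmap g o hnd]
    have hins : (PySem.Dict.counter (g.getD o [])).insert b
        ((PySem.Dict.counter (g.getD o [])).getD b 0 + 1)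
        = PySem.Dict.counter (g.getD o [] ++ [b]) := by
      rw [PySem.Dict.counter_append_singleton]
      simp [PySem.Dict.modify]
    rw [hins, pvDmap_insert]
    simp [PySem.Dict.modify]

-- loop invariant: A's dict state is B's grouping state with every group counted
lemma lego_inv (l : List String)
    (h : ∀ s ∈ l, ((PySem.Str.split? s ".").getD []).length = 2)
    (g : PySem.Dict String (List String)) (hnd : g.keys.Nodup) :
    l.foldl legoStepA (pvDmap g) = pvDmap (l.foldl legoStepB g) := by
  induction l generalizing g with
  | nil => rfl
  | cons s t ih =>
    simp only [List.foldl_cons]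
    rw [step_pvDmap g s hnd (h s (by simp))]
    apply ih (fun x hx => h x (by simp [hx]))
    have hkeys : (legoStepB g s).keys.Nodup := by
      unfold legoStepB
      cases hsp : PySem.Str.split? s "." with
      | none => exact hnd
      | some parts =>
        match parts with
        | [] => exact hnd
        | [_] => exact hnd
        | [o, b] =>
          show (g.modify o [] (· ++ [b])).keys.Nodup
          rw [show g.modify o [] (· ++ [b]) = g.insert o (g.getD o [] ++ [b]) from by
            simp [PySem.Dict.modify]]
          exact PySem.Dict.nodup_keys_insert g o _ hnd
        | _ :: _ :: _ :: _ => exact hnd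
    exact hkeys

-- ===== VERDICT (by name: the statement is the Claim_ definition above) =====
theorem lego_kocke_spec : Claim_equal_lego_kocke := by
  intro sez hdom hpre
  unfold Spec_lego_kocke lego_kocke lego_kocke_alt
  have h : ∀ s ∈ sez, ((PySem.Str.split? s ".").getD []).length = 2 := by
    intro s hs
    have := (List.all_eq_true.mp hpre) s hs
    simpa using this
  have h0 : (PySem.Dict.empty : PySem.Dict String (PySem.Dict String Int)) = pvDmap PySem.Dict.empty := rfl
  rw [h0, lego_inv sez h PySem.Dict.empty PySem.Dict.nodup_keys_empty]
  show ((sez.foldl legoStepB PySem.Dict.empty).items.map pvCount).map (fun p => (p.1, p.2.items)) = _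
  rw [List.map_map]
  apply List.map_congr_left
  intro p _
  simp [pvCount, PySem.Dict.items_counter]
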